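-- pv_equiv track=rewrite | github.com/yu-shen-pr/proj1 | LightGlue/gen_best_fold.py | split_groups_into_folds_greedy
-- ===== SOURCE A (Python) =====
-- def split_groups_into_folds_greedy(groups, num_folds=5):
--
--     groups = sorted(groups, key=lambda x: len(x), reverse=True)  # 按组大小降序排序
--     folds = [[] for _ in range(num_folds)]
--     fold_sizes = [0] * num_folds
--
--     for group in groups:
--
--         min_fold_idx = fold_sizes.index(min(fold_sizes))
--         folds[min_fold_idx].extend(group)
--         fold_sizes[min_fold_idx] += len(group)
--
--     return folds
-- ===== SOURCE B (Python) =====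
-- def split_groups_into_folds_greedy(groups, num_folds=5):
--     folds = [[] for _ in range(num_folds)]
--     # sorted queue of (fold_size, fold_index); smallest size (ties: lowest index) first
--     queue = [(0, i) for i in range(num_folds)]
--     for group in sorted(groups, key=len, reverse=True):
--         size, idx = queue.pop(0)
--         folds[idx] = folds[idx] + group
--         entry = (size + len(group), idx)
--         j = 0
--         while j < len(queue) and queue[j] < entry:
--             j += 1
--         queue.insert(j, entry)
--     return folds
-- ===== Notes on version B (the rewrite author's own statement) =====
-- stated objective: alternative
-- what changed: replaces the per-group min-scan plus list.index over fold_sizes by a priority queue: a (size, index) list kept sorted ascending, popping the head and re-inserting the updated entry at its sorted position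
import Mathlib
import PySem

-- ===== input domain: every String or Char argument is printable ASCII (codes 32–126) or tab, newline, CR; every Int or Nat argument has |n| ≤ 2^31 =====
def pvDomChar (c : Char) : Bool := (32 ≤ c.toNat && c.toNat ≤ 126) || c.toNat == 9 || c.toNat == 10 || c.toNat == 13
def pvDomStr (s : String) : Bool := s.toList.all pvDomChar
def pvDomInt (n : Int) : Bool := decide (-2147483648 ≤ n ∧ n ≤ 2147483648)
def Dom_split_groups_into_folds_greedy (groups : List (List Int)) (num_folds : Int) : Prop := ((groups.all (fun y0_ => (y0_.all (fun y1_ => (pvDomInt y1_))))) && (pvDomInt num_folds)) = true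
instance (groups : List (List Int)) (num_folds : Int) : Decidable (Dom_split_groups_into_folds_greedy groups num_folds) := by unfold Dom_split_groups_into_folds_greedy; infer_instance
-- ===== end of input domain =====

-- B replaces A's per-group min-scan + list.index over fold_sizes by a (size, index)
-- queue kept sorted ascending, popping the head and re-inserting the updated entry
-- at its sorted position (objective: alternative; same cost, different data structure).

-- ===== PORT A =====
-- folds[j].extend(group)  (in-place on the list at index j; as a pure update)
def pvExtendAt (folds : List (List Int)) (j : Nat) (g : List Int) : List (List Int) :=
  match folds[j]? with
  | some f => folds.set j (f ++ g)
  | none => folds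

-- fold_sizes[j] += len(group)
def pvBumpAt (sizes : List Int) (j : Nat) (k : Int) : List Int :=
  match sizes[j]? with
  | some s => sizes.set j (s + k)
  | none => sizes

-- one iteration of A's for-loop over (folds, fold_sizes)
def pvStepA (st : List (List Int) × List Int) (g : List Int) : List (List Int) × List Int :=
  match PySem.List.min? st.2 (fun x => x) with
  | none => st          -- Python: min([]) raises ValueError; excluded by Pre_
  | some m =>
    match PySem.List.index? st.2 m with
    | none => st        -- unreachable: m ∈ st.2
    | some j => (pvExtendAt st.1 j g, pvBumpAt st.2 j g.length)

def split_groups_into_folds_greedy (groups : List (List Int)) (num_folds : Int) : List (List Int) :=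
  let gs := PySem.List.sorted groups (fun g => (g.length : Int)) true
  let folds := (PySem.List.pyRange 0 num_folds 1).map (fun _ => ([] : List Int))
  let sizes := List.replicate num_folds.toNat (0 : Int)
  (gs.foldl pvStepA (folds, sizes)).1

-- ===== PORT B =====
-- Python tuple comparison 'queue[j] < entry' (lexicographic on (size, index))
def pvLexLt (a b : Int × Int) : Bool := a.1 < b.1 || (a.1 == b.1 && a.2 < b.2)

-- the while-loop + queue.insert(j, entry): insert entry before the first element not < it
def pvInsQ (x : Int × Int) : List (Int × Int) → List (Int × Int)
  | [] => [x]
  | y :: t => if pvLexLt y x then y :: pvInsQ x t else x :: y :: t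

-- folds[idx] = folds[idx] + group  (idx a Python int from the queue)
def pvExtendAtI (folds : List (List Int)) (i : Int) (g : List Int) : List (List Int) :=
  match PySem.List.pyGet? folds i with
  | some f => folds.set i.toNat (f ++ g)
  | none => folds

-- one iteration of B's for-loop over (folds, queue)
def pvStepB (st : List (List Int) × List (Int × Int)) (g : List Int) :
    List (List Int) × List (Int × Int) :=
  match st.2 with
  | [] => st            -- Python: queue.pop(0) raises IndexError; excluded by Pre_
  | (s, i) :: rest => (pvExtendAtI st.1 i g, pvInsQ (s + (g.length : Int), i) rest)

def split_groups_into_folds_greedy_alt (groups : List (List Int)) (num_folds : Int) : List (List Int) :=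
  let folds := (PySem.List.pyRange 0 num_folds 1).map (fun _ => ([] : List Int))
  let queue := (PySem.List.pyRange 0 num_folds 1).map (fun i => ((0 : Int), i))
  let gs := PySem.List.sorted groups (fun g => (g.length : Int)) true
  (gs.foldl pvStepB (folds, queue)).1

-- ===== PRECONDITION & SPEC =====
-- Pre_ excludes exactly num_folds ≤ 0 with nonempty groups, where Python A raises
-- ValueError (min of empty fold_sizes) and B raises IndexError (pop from empty queue).
def Pre_split_groups_into_folds_greedy (groups : List (List Int)) (num_folds : Int) : Prop :=
  1 ≤ num_folds ∨ groups = []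
instance (groups : List (List Int)) (num_folds : Int) : Decidable (Pre_split_groups_into_folds_greedy groups num_folds) := by unfold Pre_split_groups_into_folds_greedy; infer_instance

def pvWitness_split_groups_into_folds_greedy : List (List Int) × Int := ([[1], [2, 3], [4]], 2)

def Spec_split_groups_into_folds_greedy (groups : List (List Int)) (num_folds : Int) (out : List (List Int)) : Prop := out = split_groups_into_folds_greedy_alt groups num_folds
instance (groups : List (List Int)) (num_folds : Int) (out : List (List Int)) : Decidable (Spec_split_groups_into_folds_greedy groups num_folds out) := by unfold Spec_split_groups_into_folds_greedy; infer_instance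

-- ===== CLAIM (what is proved, stated in full; the proofs are below) =====
def Claim_equal_split_groups_into_folds_greedy : Prop := ∀ (groups : List (List Int)) (num_folds : Int), Dom_split_groups_into_folds_greedy groups num_folds → Pre_split_groups_into_folds_greedy groups num_folds → Spec_split_groups_into_folds_greedy groups num_folds (split_groups_into_folds_greedy groups num_folds)

-- ===== LEMMAS AND PROOFS =====

-- (size, index) pairs of a sizes list, indices starting at k
def pvPairs (k : Int) : List Int → List (Int × Int)
  | [] => []
  | s :: t => (s, k) :: pvPairs (k+1) t

-- lexicographic ≤ on (size, index)
def pvLexLE (a b : Int × Int) : Prop := a.1 < b.1 ∨ (a.1 = b.1 ∧ a.2 ≤ b.2)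

theorem pvLexLE_trans {a b c : Int × Int} (h1 : pvLexLE a b) (h2 : pvLexLE b c) : pvLexLE a c := by
  unfold pvLexLE at *; omega

theorem pvLexLE_of_not_lt {a b : Int × Int} (h : ¬ pvLexLt a b = true) : pvLexLE b a := by
  simp [pvLexLt] at h; unfold pvLexLE; omega

theorem pvLexLE_of_lt {a b : Int × Int} (h : pvLexLt a b = true) : pvLexLE a b := by
  simp [pvLexLt] at h; unfold pvLexLE; omega

theorem pvInsQ_perm (x : Int × Int) (l : List (Int × Int)) : (pvInsQ x l).Perm (x :: l) := by
  induction l with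
  | nil => simp [pvInsQ]
  | cons y t ih =>
    simp only [pvInsQ]
    split
    · exact (ih.cons y).trans (List.Perm.swap x y t)
    · exact List.Perm.refl _

theorem pvInsQ_pairwise (x : Int × Int) (l : List (Int × Int))
    (hl : l.Pairwise pvLexLE) : (pvInsQ x l).Pairwise pvLexLE := by
  induction l with
  | nil => simp [pvInsQ, pvLexLE]
  | cons y t ih =>
    rcases List.pairwise_cons.mp hl with ⟨hy, ht⟩
    simp only [pvInsQ]
    split
    · rename_i hlt
      refine List.pairwise_cons.mpr ⟨?_, ih ht⟩
      intro z hz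
      rcases List.mem_cons.mp ((pvInsQ_perm x t).mem_iff.mp hz) with rfl | hz
      · exact pvLexLE_of_lt hlt
      · exact hy z hz
    · rename_i hlt
      refine List.pairwise_cons.mpr ⟨?_, hl⟩
      intro z hz
      rcases List.mem_cons.mp hz with rfl | hz
      · exact pvLexLE_of_not_lt hlt
      · exact pvLexLE_trans (pvLexLE_of_not_lt hlt) (hy z hz)

theorem pvMem_pairs {a b : Int} : ∀ (l : List Int) (k : Int),
    (a, b) ∈ pvPairs k l ↔ ∃ n : Nat, l[n]? = some a ∧ b = k + n := by
  intro l
  induction l with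
  | nil => intro k; simp [pvPairs]
  | cons s t ih =>
    intro k
    simp only [pvPairs, List.mem_cons, ih]
    constructor
    · rintro (h | ⟨n, h1, h2⟩)
      · exact ⟨0, by simp [Prod.ext_iff] at h; simp [h.1.symm], by simp [Prod.ext_iff] at h; simp [h.2]⟩
      · exact ⟨n + 1, by simpa using h1, by push_cast; omega⟩
    · rintro ⟨n, h1, h2⟩
      cases n with
      | zero =>
        left
        simp at h1 h2
        simp [h1, h2]
      | succ n =>
        right
        exact ⟨n, by simpa using h1, by push_cast at h2 ⊢; omega⟩

theorem pvPairs_set : ∀ (l : List Int) (n : Nat) (k s v : Int), l[n]? = some s →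
    (pvPairs k (l.set n v)).Perm ((v, k + n) :: (pvPairs k l).erase (s, k + n)) := by
  intro l
  induction l with
  | nil => intro n k s v h; simp at h
  | cons a t ih =>
    intro n k s v h
    cases n with
    | zero =>
      simp at h
      subst h
      simp [pvPairs, List.erase_cons_head]
    | succ n =>
      simp at h
      have hc : k + ((n + 1 : Nat) : Int) = (k + 1) + (n : Int) := by push_cast; ring
      have e1 : pvPairs k ((a :: t).set (n + 1) v) = (a, k) :: pvPairs (k + 1) (t.set n v) := by
        simp [pvPairs]
      have hne : ¬((((a, k) : Int × Int)) == (s, (k + 1) + (n : Int))) = true := by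
        simp [Prod.ext_iff]; omega
      have e2 : (pvPairs k (a :: t)).erase (s, (k + 1) + (n : Int)) =
          (a, k) :: (pvPairs (k + 1) t).erase (s, (k + 1) + (n : Int)) := by
        simp only [pvPairs]
        rw [List.erase_cons_tail hne]
      rw [e1, hc, e2]
      exact ((ih n (k + 1) s v h).cons _).trans (List.Perm.swap _ _ _)

theorem pvPairs_replicate : ∀ (m : Nat) (k : Int),
    pvPairs k (List.replicate m (0 : Int)) = (List.range m).map (fun (j : Nat) => ((0 : Int), k + (j : Int))) := by
  intro m
  induction m with
  | zero => intro k; simp [pvPairs]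
  | succ m ih =>
    intro k
    rw [List.replicate_succ, List.range_succ_eq_map, List.map_cons, List.map_map]
    simp only [pvPairs]
    refine congrArg₂ _ (by simp) ?_
    rw [ih (k + 1)]
    refine List.map_congr_left ?_
    intro j hj
    simp only [Function.comp]
    refine congrArg _ ?_
    push_cast
    ring

theorem pvPairs_eq_nil {k : Int} {l : List Int} (h : pvPairs k l = []) : l = [] := by
  cases l with
  | nil => rfl
  | cons a t => simp [pvPairs] at h

theorem pvLoop_eq (gs : List (List Int)) : ∀ (folds : List (List Int)) (sizes : List Int)
    (q : List (Int × Int)), q.Pairwise pvLexLE → q.Perm (pvPairs 0 sizes) →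
    (gs.foldl pvStepA (folds, sizes)).1 = (gs.foldl pvStepB (folds, q)).1 := by
  induction gs with
  | nil => intro folds sizes q _ _; rfl
  | cons g gs ih =>
    intro folds sizes q hsort hperm
    cases q with
    | nil =>
      have hpn : pvPairs 0 sizes = [] := List.length_eq_zero_iff.mp hperm.length_eq.symm
      have hs : sizes = [] := pvPairs_eq_nil hpn
      subst hs
      simp only [List.foldl_cons]
      have hA : pvStepA (folds, []) g = (folds, []) := rfl
      have hB : pvStepB (folds, ([] : List (Int × Int))) g = (folds, []) := rfl
      rw [hA, hB]
      exact ih folds [] [] hsort hperm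
    | cons p rest =>
      obtain ⟨s, i⟩ := p
      -- the queue head is in pairs and is a lex lower bound of pairs
      have hmemq : (s, i) ∈ pvPairs 0 sizes := hperm.subset (List.mem_cons_self)
      have hub : ∀ p' ∈ pvPairs 0 sizes, pvLexLE (s, i) p' := by
        intro p' hp'
        rcases List.mem_cons.mp (hperm.symm.subset hp') with h | h
        · subst h; unfold pvLexLE; omega
        · exact (List.pairwise_cons.mp hsort).1 p' h
      obtain ⟨n, hn, hi⟩ := pvMem_pairs _ _ |>.mp hmemq
      have hi' : i = (n : Int) := by omega
      subst hi'
      have hnlt : n < sizes.length := (List.getElem?_eq_some_iff.mp hn).1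
      have hsn : sizes[n] = s := by
        have := (List.getElem?_eq_some_iff.mp hn).2; simpa using this
      have hsmem : s ∈ sizes := hsn ▸ List.getElem_mem hnlt
      -- s is the minimum value of sizes
      have hlb : ∀ y ∈ sizes, s ≤ y := by
        intro y hy
        obtain ⟨n0, hn0, hyn0⟩ := List.getElem_of_mem hy
        have : (y, (n0 : Int)) ∈ pvPairs 0 sizes :=
          (pvMem_pairs _ _).mpr ⟨n0, by rw [List.getElem?_eq_getElem hn0, hyn0], by omega⟩
        have := hub _ this
        unfold pvLexLE at this; simp at this; omega
      -- and n is its first index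
      have hfirst : ∀ j : Nat, j < n → sizes[j]? ≠ some s := by
        intro j hj hjs
        have : ((s, (j : Int)) : Int × Int) ∈ pvPairs 0 sizes :=
          (pvMem_pairs _ _).mpr ⟨j, hjs, by omega⟩
        have := hub _ this
        unfold pvLexLE at this; simp at this; omega
      have hmin : PySem.List.min? sizes (fun x => x) = some s := by
        cases hm : PySem.List.min? sizes (fun x => x) with
        | none =>
          exact absurd ((PySem.List.min?_eq_none_iff _ _).mp hm) (by rintro rfl; simp at hn)
        | some m =>
          have h1 : m ∈ sizes := PySem.List.min?_mem hm
          have h2 : m ≤ s := PySem.List.min?_isMin hm s hsmem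
          have h3 : s ≤ m := hlb m h1
          exact congrArg some (le_antisymm h2 h3)
      have hidx : PySem.List.index? sizes s = some n := by
        have hsome : (PySem.List.index? sizes s).isSome :=
          (PySem.List.index?_isSome_iff _ _).mpr hsmem
        obtain ⟨k, hk⟩ := Option.isSome_iff_exists.mp hsome
        obtain ⟨hklt, hks, hkfirst⟩ := PySem.List.getElem_of_index?_eq_some hk
        have hkn : k = n := by
          rcases lt_trichotomy k n with h | h | h
          · exact absurd (by simp [hklt, hks] : sizes[k]? = some s) (hfirst k h)
          · exact h
          · exact absurd hsn (hkfirst n h)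
        rw [hk, hkn]
      -- both steps update the same state
      simp only [List.foldl_cons]
      have hfold : pvExtendAt folds n g = pvExtendAtI folds (n : Int) g := by
        simp [pvExtendAt, pvExtendAtI, PySem.List.pyGet?_natCast]
      have hidx' : List.idxOf? s sizes = some n := by simpa using hidx
      have hA : pvStepA (folds, sizes) g =
          (pvExtendAtI folds (n : Int) g, sizes.set n (s + (g.length : Int))) := by
        simp [pvStepA, hmin, hidx', pvBumpAt, hn, hfold]
      have hB : pvStepB (folds, (s, (n : Int)) :: rest) g =
          (pvExtendAtI folds (n : Int) g, pvInsQ (s + (g.length : Int), (n : Int)) rest) := rfl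
      rw [hA, hB]
      apply ih
      · exact pvInsQ_pairwise _ _ (List.pairwise_cons.mp hsort).2
      · -- the new queue is a permutation of the updated pairs
        have hrest : rest.Perm ((pvPairs 0 sizes).erase (s, (n : Int))) :=
          (hperm.trans (List.perm_cons_erase hmemq)).cons_inv
        have hset := pvPairs_set sizes n 0 s (s + (g.length : Int)) hn
        have h0 : (0 : Int) + (n : Int) = (n : Int) := by omega
        rw [h0] at hset
        exact ((pvInsQ_perm _ _).trans (hrest.cons _)).trans hset.symm

-- ===== VERDICT (by name: the statement is the Claim_ definition above) =====
theorem split_groups_into_folds_greedy_spec : Claim_equal_split_groups_into_folds_greedy := by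
  intro groups num_folds _ _
  unfold Spec_split_groups_into_folds_greedy
  have hq : (PySem.List.pyRange 0 num_folds 1).map (fun i => ((0 : Int), i)) =
      pvPairs 0 (List.replicate num_folds.toNat (0 : Int)) := by
    rw [pvPairs_replicate, PySem.List.pyRange_one, List.map_map,
        show num_folds - 0 = num_folds from sub_zero _]
    refine List.map_congr_left ?_
    intro j hj
    simp [Function.comp]
  have hpair : ((PySem.List.pyRange 0 num_folds 1).map (fun i => ((0 : Int), i))).Pairwise pvLexLE := by
    rw [PySem.List.pyRange_one, List.map_map]
    refine List.Pairwise.map _ ?_ List.pairwise_lt_range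
    intro a b hab
    simp only [Function.comp]
    unfold pvLexLE
    simp
    omega
  show (List.foldl pvStepA
      ((PySem.List.pyRange 0 num_folds 1).map (fun _ => ([] : List Int)),
       List.replicate num_folds.toNat (0 : Int))
      (PySem.List.sorted groups (fun g => (g.length : Int)) true)).1 =
    (List.foldl pvStepB
      ((PySem.List.pyRange 0 num_folds 1).map (fun _ => ([] : List Int)),
       (PySem.List.pyRange 0 num_folds 1).map (fun i => ((0 : Int), i)))
      (PySem.List.sorted groups (fun g => (g.length : Int)) true)).1
  exact pvLoop_eq _ _ _ _ hpair (by rw [hq])
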